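-- pv_equiv track=rewrite | github.com/Brown-University-Library/requirements-auto-updater | lib/lib_django_updater.py | parse_uv_lock_version_change
-- ===== SOURCE A (Python) =====
-- def _extract_first_quoted_value(line: str) -> str | None:
--     """
--     Extracts the first double-quoted value from a TOML-like assignment line.
--
--     Returns None when the line does not contain a pair of double quotes.
--     """
--     first_quote: int = line.find('"')
--     if first_quote == -1:
--         return None
--
--     second_quote: int = line.find('"', first_quote + 1)
--     if second_quote == -1:
--         return None
--
--     return line[first_quote + 1 : second_quote]
--
-- def parse_uv_lock_version_change(
--     diff_text: str,
--     package_name: str,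
-- ) -> tuple[bool, str | None, str | None]:
--     """
--     Parses a unified diff of uv.lock to detect a version change for a given package.
--
--     Tracks when inside a [[package]] block, reads the most recent name entry, and
--     (within the matching package block) captures -version/+version values.
--     """
--     in_package_block: bool = False
--     current_package_name: str | None = None
--     old_version: str | None = None
--     new_version: str | None = None
--     found_change: bool = False
--
--     target_name: str = package_name.lower()
--
--     for raw_line in diff_text.splitlines():
--         if not raw_line:
--             continue
--
--         marker: str = raw_line[0]
--         has_diff_marker: bool = marker in {' ', '+', '-'}
--
--         # In a normal unified diff, only these three markers represent file content.
--         # Non-marker lines (diff headers, @@ hunks, etc.) are ignored by content checks anyway.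
--         content: str = raw_line[1:] if has_diff_marker else raw_line
--         content = content.strip()
--
--         if content == '[[package]]':
--             in_package_block = True
--             current_package_name = None
--             old_version = None
--             new_version = None
--             continue
--
--         if not in_package_block:
--             continue
--
--         if content.startswith('name ='):
--             current_package_name = _extract_first_quoted_value(content)
--             continue
--
--         if (current_package_name or '').lower() != target_name:
--             continue
--
--         if marker == '-' and content.startswith('version ='):
--             old_version = _extract_first_quoted_value(content)
--         elif marker == '+' and content.startswith('version ='):
--             new_version = _extract_first_quoted_value(content)
--
--         if old_version is not None and new_version is not None and old_version != new_version:
--             found_change = True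
--             break
--
--     return found_change, old_version, new_version
-- ===== SOURCE B (Python) =====
-- def _extract_first_quoted_value(line: str) -> str | None:
--     first_quote: int = line.find('"')
--     if first_quote == -1:
--         return None
--     second_quote: int = line.find('"', first_quote + 1)
--     if second_quote == -1:
--         return None
--     return line[first_quote + 1 : second_quote]
--
--
-- def _split_blocks(diff_text: str) -> list:
--     """Phase 1: partition the diff's content lines into ordered [[package]] blocks
--     of (marker, stripped-content) pairs; lines before the first block are dropped."""
--     blocks = []
--     cur = None
--     for raw_line in diff_text.splitlines():
--         if not raw_line:
--             continue
--         marker = raw_line[0]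
--         content = (raw_line[1:] if marker in {' ', '+', '-'} else raw_line).strip()
--         if content == '[[package]]':
--             if cur is not None:
--                 blocks.append(cur)
--             cur = []
--         elif cur is not None:
--             cur.append((marker, content))
--     if cur is not None:
--         blocks.append(cur)
--     return blocks
--
--
-- def _scan_block(items: list, target_name: str) -> tuple:
--     """Phase 2 helper: replay one block; (True, old, new) at the first differing
--     -version/+version pair under a matching name, else (False, old, new) at block end."""
--     name = None
--     old = None
--     new = None
--     for marker, content in items:
--         if content.startswith('name ='):
--             name = _extract_first_quoted_value(content)
--             continue
--         if (name or '').lower() != target_name: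
--             continue
--         if marker == '-' and content.startswith('version ='):
--             old = _extract_first_quoted_value(content)
--         elif marker == '+' and content.startswith('version ='):
--             new = _extract_first_quoted_value(content)
--         if old is not None and new is not None and old != new:
--             return True, old, new
--     return False, old, new
--
--
-- def parse_uv_lock_version_change(diff_text, package_name):
--     target_name = package_name.lower()
--     old = None
--     new = None
--     for block in _split_blocks(diff_text):
--         found, old, new = _scan_block(block, target_name)
--         if found:
--             return True, old, new
--     return False, old, new
-- ===== Notes on version B (the rewrite author's own statement) =====
-- stated objective: alternative
-- what changed: A's single stateful sweep (in-block flag, per-line resets, break) is replaced by a two-phase decomposition: first partition the diff's content lines into ordered [[package]] blocks of (marker, content) pairs, then scan the blocks in order with a per-block helper that returns at the first differing -version/+version pair.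
import Mathlib
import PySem

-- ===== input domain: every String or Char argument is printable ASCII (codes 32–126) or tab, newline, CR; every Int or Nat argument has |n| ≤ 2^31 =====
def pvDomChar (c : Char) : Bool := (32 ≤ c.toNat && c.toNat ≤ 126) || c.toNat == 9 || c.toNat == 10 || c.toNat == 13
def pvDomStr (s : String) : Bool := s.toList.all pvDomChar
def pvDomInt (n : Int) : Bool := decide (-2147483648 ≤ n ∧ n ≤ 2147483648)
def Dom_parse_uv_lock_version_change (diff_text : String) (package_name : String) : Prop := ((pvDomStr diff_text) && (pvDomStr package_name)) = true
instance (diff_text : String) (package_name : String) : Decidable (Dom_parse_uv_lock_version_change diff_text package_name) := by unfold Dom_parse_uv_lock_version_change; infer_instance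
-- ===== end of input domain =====

-- B restructures A's single stateful sweep as two phases (partition lines into [[package]] blocks, then scan each block with a per-block helper); same values, objective: alternative decomposition.

-- ===== PORT A =====

-- TOML-ish literals both Pythons carry inline ('[[package]]', 'name =', 'version =')
def pvPkg : List Char := "[[package]]".toList
def pvNameEq : List Char := "name =".toList
def pvVerEq : List Char := "version =".toList

-- _extract_first_quoted_value (identical helper in A and B; B's Python keeps it verbatim)
def pvExtractQuoted (line : List Char) : Option (List Char) :=
  let first_quote : Int := PySem.Chars.find line ['"']
  if first_quote = -1 then none
  else
    let second_quote : Int := PySem.Chars.findFrom line ['"'] (first_quote + 1) none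
    if second_quote = -1 then none
    else some (PySem.Chars.slice line (some (first_quote + 1)) (some second_quote))

-- the for-loop of A, with break rendered as an early return
def pvLoopA (target : List Char) :
    List (List Char) → Bool → Option (List Char) → Option (List Char) → Option (List Char) →
    Bool × Option (List Char) × Option (List Char)
  | [], _, _, old_version, new_version => (false, old_version, new_version)
  | raw :: rest, inP, cur, old_version, new_version =>
    match raw with
    | [] => pvLoopA target rest inP cur old_version new_version
    | marker :: tl =>
      let content := PySem.Chars.strip (if marker = ' ' ∨ marker = '+' ∨ marker = '-' then tl else marker :: tl)
      if content = pvPkg then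
        pvLoopA target rest true none none none
      else if !inP then
        pvLoopA target rest inP cur old_version new_version
      else if PySem.Chars.startswith content pvNameEq then
        pvLoopA target rest inP (pvExtractQuoted content) old_version new_version
      else if PySem.Chars.lower (cur.getD []) ≠ target then
        pvLoopA target rest inP cur old_version new_version
      else
        let (old', new') :=
          if marker = '-' ∧ PySem.Chars.startswith content pvVerEq then
            (pvExtractQuoted content, new_version)
          else if marker = '+' ∧ PySem.Chars.startswith content pvVerEq then
            (old_version, pvExtractQuoted content)
          else (old_version, new_version)
        if old'.isSome ∧ new'.isSome ∧ old' ≠ new' then (true, old', new')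
        else pvLoopA target rest inP cur old' new'

def parse_uv_lock_version_change (diff_text : String) (package_name : String) : Bool × Option String × Option String :=
  let target := PySem.Chars.lower package_name.toList
  let (found, o, n) := pvLoopA target (PySem.Chars.splitlines diff_text.toList) false none none none
  (found, o.map String.ofList, n.map String.ofList)

-- ===== PORT B =====

-- phase 1: partition content lines into ordered [[package]] blocks of (marker, content)
def pvSplitBlocks : List (List Char) → Option (List (Char × List Char)) → List (List (Char × List Char))
  | [], cur =>
    (match cur with
     | none => []
     | some b => [b])
  | raw :: rest, cur =>
    match raw with
    | [] => pvSplitBlocks rest cur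
    | marker :: tl =>
      let content := PySem.Chars.strip (if marker = ' ' ∨ marker = '+' ∨ marker = '-' then tl else marker :: tl)
      if content = pvPkg then
        match cur with
        | none => pvSplitBlocks rest (some [])
        | some b => b :: pvSplitBlocks rest (some [])
      else
        match cur with
        | none => pvSplitBlocks rest none
        | some b => pvSplitBlocks rest (some (b ++ [(marker, content)]))

-- phase 2 helper: replay one block
def pvScanBlock (target : List Char) :
    List (Char × List Char) → Option (List Char) → Option (List Char) → Option (List Char) →
    Bool × Option (List Char) × Option (List Char)
  | [], _, old, new => (false, old, new)
  | (marker, content) :: rest, name, old, new =>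
    if PySem.Chars.startswith content pvNameEq then
      pvScanBlock target rest (pvExtractQuoted content) old new
    else if PySem.Chars.lower (name.getD []) ≠ target then
      pvScanBlock target rest name old new
    else
      let (old', new') :=
        if marker = '-' ∧ PySem.Chars.startswith content pvVerEq then
          (pvExtractQuoted content, new)
        else if marker = '+' ∧ PySem.Chars.startswith content pvVerEq then
          (old, pvExtractQuoted content)
        else (old, new)
      if old'.isSome ∧ new'.isSome ∧ old' ≠ new' then (true, old', new')
      else pvScanBlock target rest name old' new'

-- phase 2: scan the blocks in order; the last scanned block's (old, new) survive
def pvScanBlocks (target : List Char) :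
    List (List (Char × List Char)) → Option (List Char) → Option (List Char) →
    Bool × Option (List Char) × Option (List Char)
  | [], old, new => (false, old, new)
  | b :: bs, _, _ =>
    let (found, o, n) := pvScanBlock target b none none none
    if found then (true, o, n) else pvScanBlocks target bs o n

def parse_uv_lock_version_change_alt (diff_text : String) (package_name : String) : Bool × Option String × Option String :=
  let target := PySem.Chars.lower package_name.toList
  let blocks := pvSplitBlocks (PySem.Chars.splitlines diff_text.toList) none
  let (found, o, n) := pvScanBlocks target blocks none none
  (found, o.map String.ofList, n.map String.ofList)

-- ===== PRECONDITION & SPEC =====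
def Spec_parse_uv_lock_version_change (diff_text : String) (package_name : String) (out : Bool × Option String × Option String) : Prop := out = parse_uv_lock_version_change_alt diff_text package_name
instance (diff_text : String) (package_name : String) (out : Bool × Option String × Option String) : Decidable (Spec_parse_uv_lock_version_change diff_text package_name out) := by unfold Spec_parse_uv_lock_version_change; infer_instance

-- ===== CLAIM (what is proved, stated in full; the proofs are below) =====
def Claim_equal_parse_uv_lock_version_change : Prop := ∀ (diff_text : String) (package_name : String), Dom_parse_uv_lock_version_change diff_text package_name → Spec_parse_uv_lock_version_change diff_text package_name (parse_uv_lock_version_change diff_text package_name)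

-- ===== LEMMAS AND PROOFS =====

-- pvSplitBlocks with an open current block: the open block's items are a prefix of the first block, independently of what was already accumulated
theorem pvSplitBlocks_param (lines : List (List Char)) :
    ∃ r bs, ∀ b, pvSplitBlocks lines (some b) = (b ++ r) :: bs := by
  induction lines with
  | nil => exact ⟨[], [], fun b => by simp [pvSplitBlocks]⟩
  | cons raw rest ih =>
    match raw with
    | [] =>
      obtain ⟨r, bs, h⟩ := ih
      exact ⟨r, bs, fun b => by simpa [pvSplitBlocks] using h b⟩
    | marker :: tl =>
      by_cases hpkg : PySem.Chars.strip (if marker = ' ' ∨ marker = '+' ∨ marker = '-' then tl else marker :: tl) = pvPkg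
      · exact ⟨[], pvSplitBlocks rest (some []), fun b => by simp [pvSplitBlocks, hpkg]⟩
      · obtain ⟨r, bs, h⟩ := ih
        refine ⟨(marker, PySem.Chars.strip (if marker = ' ' ∨ marker = '+' ∨ marker = '-' then tl else marker :: tl)) :: r, bs, fun b => ?_⟩
        simp only [pvSplitBlocks, hpkg]
        simpa using h (b ++ [(marker, PySem.Chars.strip (if marker = ' ' ∨ marker = '+' ∨ marker = '-' then tl else marker :: tl))])

-- A's loop inside a block equals: finish the current block with pvScanBlock, then pvScanBlocks on the rest
theorem pvLoopA_in_block (target : List Char) (lines : List (List Char)) :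
    ∀ r bs name old new, (∀ b, pvSplitBlocks lines (some b) = (b ++ r) :: bs) →
    pvLoopA target lines true name old new =
      (let (f, o, n) := pvScanBlock target r name old new;
       if f then (true, o, n) else pvScanBlocks target bs o n) := by
  induction lines with
  | nil =>
    intro r bs name old new h
    have h0 := h []
    simp [pvSplitBlocks] at h0
    obtain ⟨hr, hbs⟩ := h0
    subst hr; subst hbs
    simp [pvLoopA, pvScanBlock, pvScanBlocks]
  | cons raw rest ih =>
    intro r bs name old new h
    match raw with
    | [] =>
      have h' : ∀ b, pvSplitBlocks rest (some b) = (b ++ r) :: bs := by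
        intro b; simpa [pvSplitBlocks] using h b
      simpa [pvLoopA] using ih r bs name old new h'
    | marker :: tl =>
      set content := PySem.Chars.strip (if marker = ' ' ∨ marker = '+' ∨ marker = '-' then tl else marker :: tl) with hc
      by_cases hpkg : content = pvPkg
      · -- new block begins: current block's remainder is empty
        have h0 := h []
        simp only [pvSplitBlocks, ← hc, hpkg, if_pos] at h0
        simp at h0
        obtain ⟨hr, hbs⟩ := h0
        subst hr
        obtain ⟨r2, bs2, h2⟩ := pvSplitBlocks_param rest
        rw [h2 []] at hbs
        simp only [pvLoopA, ← hc, hpkg, if_pos]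
        rw [ih r2 bs2 none none none h2]
        simp [pvScanBlock, ← hbs, pvScanBlocks]
      · have hstep : ∀ b, pvSplitBlocks rest (some (b ++ [(marker, content)])) = (b ++ r) :: bs := by
          intro b
          have := h b
          simpa [pvSplitBlocks, ← hc, hpkg] using this
        obtain ⟨r2, bs2, h2⟩ := pvSplitBlocks_param rest
        have hshape : r = (marker, content) :: r2 ∧ bs = bs2 := by
          have := hstep []
          simp only [List.nil_append] at this
          rw [h2 [(marker, content)]] at this
          simp at this
          exact ⟨this.1.symm, this.2.symm⟩
        obtain ⟨hr, hbs⟩ := hshape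
        subst hr
        rw [← hbs] at h2
        simp only [pvLoopA, ← hc, hpkg, if_neg, not_false_iff, Bool.not_true]
        by_cases hname : PySem.Chars.startswith content pvNameEq = true
        · simp only [hname, if_pos]
          rw [ih r2 bs (pvExtractQuoted content) old new h2]
          simp [pvScanBlock, hname]
        · simp only [hname, if_neg, Bool.false_eq_true, not_false_iff]
          by_cases hmatch : PySem.Chars.lower (name.getD []) ≠ target
          · rw [if_pos hmatch, ih r2 bs name old new h2]
            have hrhs : pvScanBlock target ((marker, content) :: r2) name old new =
                pvScanBlock target r2 name old new := by
              simp [pvScanBlock, hname, hmatch]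
            rw [hrhs]
          · rw [if_neg hmatch]
            have hrhs : pvScanBlock target ((marker, content) :: r2) name old new =
                (let (old', new') :=
                  if marker = '-' ∧ PySem.Chars.startswith content pvVerEq then (pvExtractQuoted content, new)
                  else if marker = '+' ∧ PySem.Chars.startswith content pvVerEq then (old, pvExtractQuoted content)
                  else (old, new)
                 if old'.isSome ∧ new'.isSome ∧ old' ≠ new' then (true, old', new')
                 else pvScanBlock target r2 name old' new') := by
              simp only [pvScanBlock]
              rw [if_neg hname, if_neg hmatch]
            rw [hrhs]
            by_cases hminus : marker = '-' ∧ PySem.Chars.startswith content pvVerEq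
            · simp only [if_pos hminus]
              by_cases htrig : (pvExtractQuoted content).isSome ∧ new.isSome ∧ pvExtractQuoted content ≠ new
              · simp [htrig]
              · simp only [if_neg htrig]
                rw [ih r2 bs name (pvExtractQuoted content) new h2]
            · simp only [if_neg hminus]
              by_cases hplus : marker = '+' ∧ PySem.Chars.startswith content pvVerEq
              · simp only [if_pos hplus]
                by_cases htrig : old.isSome ∧ (pvExtractQuoted content).isSome ∧ old ≠ pvExtractQuoted content
                · simp [htrig]
                · simp only [if_neg htrig]
                  rw [ih r2 bs name old (pvExtractQuoted content) h2]
              · simp only [if_neg hplus]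
                by_cases htrig : old.isSome ∧ new.isSome ∧ old ≠ new
                · simp [htrig]
                · simp only [if_neg htrig]
                  rw [ih r2 bs name old new h2]

-- A's loop outside any block equals scanning the blocks built from the remaining lines
theorem pvLoopA_out_block (target : List Char) (lines : List (List Char)) :
    ∀ name old new, pvLoopA target lines false name old new =
      pvScanBlocks target (pvSplitBlocks lines none) old new := by
  induction lines with
  | nil => intro name old new; simp [pvLoopA, pvSplitBlocks, pvScanBlocks]
  | cons raw rest ih =>
    intro name old new
    match raw with
    | [] => simpa [pvLoopA, pvSplitBlocks] using ih name old new
    | marker :: tl =>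
      set content := PySem.Chars.strip (if marker = ' ' ∨ marker = '+' ∨ marker = '-' then tl else marker :: tl) with hc
      by_cases hpkg : content = pvPkg
      · simp only [pvLoopA, pvSplitBlocks, ← hc, hpkg, if_pos]
        obtain ⟨r2, bs2, h2⟩ := pvSplitBlocks_param rest
        rw [pvLoopA_in_block target rest r2 bs2 none none none h2]
        rw [h2 []]
        simp [pvScanBlocks]
      · simp only [pvLoopA, pvSplitBlocks, ← hc, hpkg, if_neg, not_false_iff]
        simpa using ih name old new

-- ===== VERDICT (by name: the statement is the Claim_ definition above) =====
theorem parse_uv_lock_version_change_spec : Claim_equal_parse_uv_lock_version_change := by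
  intro diff_text package_name _
  unfold Spec_parse_uv_lock_version_change
  simp only [parse_uv_lock_version_change, parse_uv_lock_version_change_alt]
  rw [pvLoopA_out_block]
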